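-- pv_equiv track=rewrite | github.com/AM-ash-OR-AM-I/PIP | assign3/q5.py | get_noise
-- ===== SOURCE A (Python) =====
-- from itertools import pairwise
--
-- noises = [
--     (40, "Quiet Room"),
--     (70, "Alarm Clock"),
--     (106, "Gas Lawnmower"),
--     (130, "Jackhammer"),
-- ]
--
-- def get_noise(decibels):
--     for lower, higher in pairwise(noises):
--         if decibels == lower[0]:
--             return lower[1]
--         elif decibels == higher[0]:
--             return higher[1]
--         elif lower[0] < decibels < higher[0]:
--             return f"Between {lower[1]} and {higher[1]}"
-- ===== SOURCE B (Python) =====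
-- from bisect import bisect_left
--
-- THRESHOLDS = [40, 70, 106, 130]
-- LABELS = ["Quiet Room", "Alarm Clock", "Gas Lawnmower", "Jackhammer"]
--
-- def get_noise(decibels):
--     idx = bisect_left(THRESHOLDS, decibels)
--     if idx < len(THRESHOLDS) and THRESHOLDS[idx] == decibels:
--         return LABELS[idx]
--     if 0 < idx < len(THRESHOLDS):
--         return f"Between {LABELS[idx - 1]} and {LABELS[idx]}"
--     return None
-- ===== Notes on version B (the rewrite author's own statement) =====
-- stated objective: idiomatic
-- what changed: Replaces the linear pairwise scan over (threshold,label) tuples with a bisect_left binary search over a threshold list plus index arithmetic into a parallel label list.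
import Mathlib
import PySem

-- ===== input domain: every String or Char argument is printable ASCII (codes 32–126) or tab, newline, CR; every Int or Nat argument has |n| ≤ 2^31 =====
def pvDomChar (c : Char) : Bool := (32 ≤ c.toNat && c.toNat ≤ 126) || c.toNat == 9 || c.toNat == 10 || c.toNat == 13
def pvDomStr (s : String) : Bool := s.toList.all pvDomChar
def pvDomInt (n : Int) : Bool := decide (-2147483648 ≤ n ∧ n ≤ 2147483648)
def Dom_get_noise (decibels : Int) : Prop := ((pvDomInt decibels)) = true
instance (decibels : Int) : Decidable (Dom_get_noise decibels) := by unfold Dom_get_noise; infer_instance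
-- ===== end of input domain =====

-- B replaces A's linear pairwise scan with bisect_left binary search plus index arithmetic (idiomatic).

-- ===== PORT A =====
-- module-level constant `noises`
def noisesA : List (Int × String) :=
  [(40, "Quiet Room"), (70, "Alarm Clock"), (106, "Gas Lawnmower"), (130, "Jackhammer")]

-- itertools.pairwise
def pairwiseA : List (Int × String) → List ((Int × String) × (Int × String))
  | a :: b :: rest => (a, b) :: pairwiseA (b :: rest)
  | _ => []

-- the for-loop body with early returns
def getNoiseLoopA (decibels : Int) : List ((Int × String) × (Int × String)) → Option String
  | [] => none
  | (lower, higher) :: rest =>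
    if decibels == lower.1 then some lower.2
    else if decibels == higher.1 then some higher.2
    else if lower.1 < decibels ∧ decibels < higher.1 then
      some ("Between " ++ lower.2 ++ " and " ++ higher.2)
    else getNoiseLoopA decibels rest

def get_noise (decibels : Int) : Option String :=
  getNoiseLoopA decibels (pairwiseA noisesA)

-- ===== PORT B =====
def thresholdsB : List Int := [40, 70, 106, 130]
def labelsB : List String := ["Quiet Room", "Alarm Clock", "Gas Lawnmower", "Jackhammer"]

-- bisect.bisect_left on a sorted list = number of elements strictly below x
def bisectLeftB (xs : List Int) (x : Int) : Nat := (xs.takeWhile (· < x)).length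

def get_noise_alt (decibels : Int) : Option String :=
  let idx := bisectLeftB thresholdsB decibels
  if idx < thresholdsB.length ∧ thresholdsB.getD idx 0 == decibels then
    some (labelsB.getD idx "")
  else if 0 < idx ∧ idx < thresholdsB.length then
    some ("Between " ++ labelsB.getD (idx - 1) "" ++ " and " ++ labelsB.getD idx "")
  else none

-- ===== PRECONDITION & SPEC =====
def Spec_get_noise (decibels : Int) (out : Option String) : Prop := out = get_noise_alt decibels
instance (decibels : Int) (out : Option String) : Decidable (Spec_get_noise decibels out) := by unfold Spec_get_noise; infer_instance

-- ===== CLAIM (what is proved, stated in full; the proofs are below) =====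
def Claim_equal_get_noise : Prop := ∀ (decibels : Int), Dom_get_noise decibels → Spec_get_noise decibels (get_noise decibels)

-- ===== LEMMAS AND PROOFS =====

-- ===== VERDICT (by name: the statement is the Claim_ definition above) =====
theorem get_noise_spec : Claim_equal_get_noise := by
  intro d _
  unfold Spec_get_noise get_noise get_noise_alt getNoiseLoopA pairwiseA noisesA thresholdsB labelsB bisectLeftB
  by_cases h40 : (40 : Int) < d <;> by_cases h70 : (70 : Int) < d <;>
    by_cases h106 : (106 : Int) < d <;> by_cases h130 : (130 : Int) < d <;>
    simp [getNoiseLoopA, pairwiseA, h40, h70, h106, h130, List.takeWhile] <;> split_ifs <;> first | rfl | omega | simp_all | (simp_all; omega)
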